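-- pv_equiv track=rewrite | github.com/ngocson2vn/cpp | MLCompiler/pytorch/check_compatible_stride.py | is_compatible_stride
-- ===== SOURCE A (Python) =====
-- def is_compatible_stride(base_stride: list[int], other_stride: list[int]):
--     if len(other_stride) != len(base_stride):
--         return False
--     if sum(other_stride) != sum(base_stride):
--         return False
--     indices = set[int]()
--     for s in other_stride:
--         try:
--             idx = base_stride.index(s)
--             indices.add(idx)
--         except ValueError:
--             pass
--     if len(indices) != len(base_stride):
--         return False
--     return True
-- ===== SOURCE B (Python) =====
-- def is_compatible_stride(base_stride: list[int], other_stride: list[int]):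
--     if len(base_stride) != len(other_stride):
--         return False
--     if len(set(base_stride)) != len(base_stride):
--         return False
--     return sorted(base_stride) == sorted(other_stride)
-- ===== Notes on version B (the rewrite author's own statement) =====
-- stated objective: simpler
-- what changed: Replaces the per-element first-index scan into an index set (plus a redundant sum check) with a distinctness test on base_stride and a sorted-multiset comparison.
import Mathlib
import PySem

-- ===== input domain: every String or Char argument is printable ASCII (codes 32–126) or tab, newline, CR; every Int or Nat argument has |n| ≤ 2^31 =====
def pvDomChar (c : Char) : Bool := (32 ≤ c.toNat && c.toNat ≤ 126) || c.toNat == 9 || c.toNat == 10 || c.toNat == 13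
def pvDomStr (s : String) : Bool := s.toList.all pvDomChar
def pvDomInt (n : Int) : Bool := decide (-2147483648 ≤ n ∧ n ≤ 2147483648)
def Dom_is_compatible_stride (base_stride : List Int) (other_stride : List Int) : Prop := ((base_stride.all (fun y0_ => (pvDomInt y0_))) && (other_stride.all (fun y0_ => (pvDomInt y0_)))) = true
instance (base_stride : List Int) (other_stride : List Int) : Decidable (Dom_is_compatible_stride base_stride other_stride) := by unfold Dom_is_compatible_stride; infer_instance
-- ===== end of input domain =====

-- B replaces A's per-element first-index coverage scan (plus a redundant sum check) by a
-- distinctness test on base_stride and a sorted-lists comparison (objective: simpler).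


-- ===== PORT A =====
def is_compatible_stride (base_stride : List Int) (other_stride : List Int) : Bool :=
  if other_stride.length ≠ base_stride.length then false
  else if other_stride.sum ≠ base_stride.sum then false
  else
    -- for s in other_stride: try: idx = base_stride.index(s); indices.add(idx)  except ValueError: pass
    let indices : PySem.Set Nat :=
      other_stride.foldl (fun acc s =>
        match PySem.List.index? base_stride s with
        | some idx => PySem.Set.add acc idx
        | none => acc) PySem.Set.empty
    if PySem.Set.len indices ≠ (base_stride.length : Int) then false
    else true

-- ===== PORT B =====
def is_compatible_stride_alt (base_stride : List Int) (other_stride : List Int) : Bool :=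
  if (base_stride.length : Int) ≠ (other_stride.length : Int) then false
  else if PySem.Set.len (PySem.Set.ofList base_stride) ≠ (base_stride.length : Int) then false
  else decide (PySem.List.sorted base_stride (fun x => x) false
             = PySem.List.sorted other_stride (fun x => x) false)

-- ===== PRECONDITION & SPEC =====
def Spec_is_compatible_stride (base_stride : List Int) (other_stride : List Int) (out : Bool) : Prop := out = is_compatible_stride_alt base_stride other_stride
instance (base_stride : List Int) (other_stride : List Int) (out : Bool) : Decidable (Spec_is_compatible_stride base_stride other_stride out) := by unfold Spec_is_compatible_stride; infer_instance

-- ===== CLAIM (what is proved, stated in full; the proofs are below) =====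
def Claim_equal_is_compatible_stride : Prop := ∀ (base_stride : List Int) (other_stride : List Int), Dom_is_compatible_stride base_stride other_stride → Spec_is_compatible_stride base_stride other_stride (is_compatible_stride base_stride other_stride)

-- ===== LEMMAS AND PROOFS =====

-- A's index-collecting loop is Set.ofList of the successful lookups.
theorem fold_indices_eq (base other : List Int) (acc : PySem.Set Nat) :
    other.foldl (fun acc s =>
        match PySem.List.index? base s with
        | some idx => PySem.Set.add acc idx
        | none => acc) acc
      = (other.filterMap (fun s => PySem.List.index? base s)).foldl PySem.Set.add acc := by
  induction other generalizing acc with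
  | nil => rfl
  | cons s t ih =>
    simp only [List.foldl_cons, List.filterMap_cons]
    cases PySem.List.index? base s <;> exact ih _

theorem fold_indices_eq' (base other : List Int) :
    other.foldl (fun acc s =>
        match PySem.List.index? base s with
        | some idx => PySem.Set.add acc idx
        | none => acc) PySem.Set.empty
      = PySem.Set.ofList (other.filterMap (fun s => PySem.List.index? base s)) := by
  rw [fold_indices_eq, PySem.Set.ofList_eq_foldl]; rfl

-- A Nodup list of naturals all below n has length n iff it contains every k < n.
theorem nodup_lt_length_eq_iff (S : List Nat) (n : Nat) (hnd : S.Nodup)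
    (hlt : ∀ k ∈ S, k < n) : S.length = n ↔ ∀ k < n, k ∈ S := by
  have hsub : S.toFinset ⊆ Finset.range n := by
    intro k hk
    simp only [List.mem_toFinset] at hk
    exact Finset.mem_range.mpr (hlt k hk)
  constructor
  · intro hlen k hk
    have hcard : S.toFinset.card = n := by
      rw [List.toFinset_card_of_nodup hnd, hlen]
    have heq : S.toFinset = Finset.range n :=
      Finset.eq_of_subset_of_card_le hsub (by simp [hcard])
    have : k ∈ S.toFinset := heq ▸ Finset.mem_range.mpr hk
    simpa using this
  · intro hall
    have hsup : Finset.range n ⊆ S.toFinset := by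
      intro k hk
      simpa using hall k (Finset.mem_range.mp hk)
    have heq : S.toFinset = Finset.range n := Finset.Subset.antisymm hsub hsup
    rw [← List.toFinset_card_of_nodup hnd, heq, Finset.card_range]

-- In a Nodup list, the first index of base[k] is k itself.
theorem index?_getElem_of_nodup (base : List Int) (hnd : base.Nodup)
    (k : Nat) (hk : k < base.length) :
    PySem.List.index? base base[k] = some k := by
  rw [PySem.List.index?_eq_some_iff]
  refine ⟨base.take k, base.drop (k + 1), ?_, by simp [Nat.le_of_lt hk], ?_⟩
  · rw [List.getElem_cons_drop, List.take_append_drop]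
  · intro hmem
    have hdisj := List.disjoint_take_drop (m := k) (n := k) hnd (le_refl k)
    exact hdisj hmem (by rw [← List.getElem_cons_drop hk]; exact List.mem_cons_self)

-- A's coverage test characterised: base is Nodup and every base element occurs in other.
theorem coverage_iff (base other : List Int) :
    ((PySem.Set.ofList (other.filterMap (fun s => PySem.List.index? base s))).length
        = base.length)
      ↔ (base.Nodup ∧ ∀ v ∈ base, v ∈ other) := by
  set L := other.filterMap (fun s => PySem.List.index? base s) with hL
  have hmemL : ∀ k, k ∈ PySem.Set.ofList L ↔
      ∃ s ∈ other, PySem.List.index? base s = some k := by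
    intro k
    rw [PySem.Set.mem_ofList, hL, List.mem_filterMap]
  have hlt : ∀ k ∈ PySem.Set.ofList L, k < base.length := by
    intro k hk
    obtain ⟨s, _, hs⟩ := (hmemL k).mp hk
    obtain ⟨hklt, _, _⟩ := PySem.List.getElem_of_index?_eq_some hs
    exact hklt
  rw [nodup_lt_length_eq_iff _ _ (PySem.Set.nodup_ofList L) hlt]
  constructor
  · intro hall
    have hmem : ∀ k, k < base.length → ∃ s ∈ other,
        PySem.List.index? base s = some k := fun k hk => (hmemL k).mp (hall k hk)
    constructor
    · rw [List.nodup_iff_pairwise_ne] at *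
      rw [List.pairwise_iff_getElem]
      intro i j hi hj hij
      obtain ⟨s, _, hs⟩ := hmem j hj
      obtain ⟨hjlt, hgj, hfirst⟩ := PySem.List.getElem_of_index?_eq_some hs
      intro hEq
      exact hfirst i hij (by rw [hEq]; exact hgj)
    · intro v hv
      obtain ⟨k, hk, hgk⟩ := List.mem_iff_getElem.mp hv
      obtain ⟨s, hso, hs⟩ := hmem k hk
      obtain ⟨_, hgk', _⟩ := PySem.List.getElem_of_index?_eq_some hs
      rw [← hgk, hgk']
      exact hso
  · rintro ⟨hnd, hsub⟩ k hk
    rw [hmemL k]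
    exact ⟨base[k], hsub _ (List.getElem_mem hk), index?_getElem_of_nodup base hnd k hk⟩

-- B's distinctness test characterised.
theorem ofList_length_eq_iff_nodup (base : List Int) :
    ((PySem.Set.ofList base).length = base.length) ↔ base.Nodup := by
  constructor
  · intro h
    have h1 : (PySem.Set.ofList base).toFinset = base.toFinset := by
      ext x; simp [PySem.Set.mem_ofList]
    have h2 : base.dedup.length = base.length := by
      rw [← List.card_toFinset, ← h1,
        List.toFinset_card_of_nodup (PySem.Set.nodup_ofList base), h]
    have h3 : base.dedup = base := (List.dedup_sublist base).eq_of_length h2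
    exact List.dedup_eq_self.mp h3
  · intro h
    rw [PySem.Set.ofList_eq_self_of_nodup base h]

-- ===== VERDICT (by name: the statement is the Claim_ definition above) =====
theorem is_compatible_stride_spec : Claim_equal_is_compatible_stride := by
  intro base other _
  show is_compatible_stride base other = is_compatible_stride_alt base other
  unfold is_compatible_stride is_compatible_stride_alt
  by_cases hlen : other.length = base.length
  · simp only [hlen, ne_eq, not_true_eq_false, if_false, ite_not]
    rw [fold_indices_eq']
    have hcov := coverage_iff base other
    simp only [PySem.List.index?_eq_idxOf?] at hcov ⊢
    have hnd := ofList_length_eq_iff_nodup base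
    by_cases hB : base.Nodup
    · by_cases hsub : ∀ v ∈ base, v ∈ other
      · -- both sides true: base ~ other
        have hperm : base.Perm other :=
          (List.Nodup.subperm hB hsub).perm_of_length_le (le_of_eq hlen)
        have hcovT := hcov.mpr ⟨hB, hsub⟩
        have hsum : other.sum = base.sum := (hperm.symm).sum_eq
        have hsort : PySem.List.sorted base (fun x => x) false
            = PySem.List.sorted other (fun x => x) false :=
          (PySem.List.sorted_id_eq_sorted_id_iff_perm base other).mpr hperm
        simp [hsum, PySem.Set.len, hcovT, hnd.mpr hB, hsort]
      · -- coverage fails; sorted lists differ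
        have hcovF := (not_congr hcov).mpr (by tauto)
        have hsort : ¬ PySem.List.sorted base (fun x => x) false
            = PySem.List.sorted other (fun x => x) false := by
          rw [PySem.List.sorted_id_eq_sorted_id_iff_perm]
          intro hperm
          exact hsub (fun v hv => hperm.mem_iff.mp hv)
        simp only [PySem.Set.len]
        by_cases hsum : other.sum = base.sum <;>
          simp [hsum, hcovF, hnd.mpr hB, hsort]
    · -- base has duplicates: coverage fails, distinctness fails
      have hcovF := (not_congr hcov).mpr (by tauto : ¬ (base.Nodup ∧ ∀ v ∈ base, v ∈ other))
      have hndF : ¬ (PySem.Set.ofList base).length = base.length := by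
        rw [hnd]; exact hB
      simp only [PySem.Set.len]
      by_cases hsum : other.sum = base.sum <;>
        simp [hsum, hcovF, hndF]
  · simp [hlen, Ne.symm]
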